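-- pv_equiv track=rewrite | github.com/homulily85/NumberlinkSolver | encode.py | at_most_k
-- ===== SOURCE A (Python) =====
-- from itertools import combinations
--
-- def at_most_k(a:list,k:int):
--     tuples = combinations(a,k+1)
--     clauses = []
--     for tuple in tuples:
--         clause = []
--         for element in tuple:
--             clause.append(-element)
--         clauses.append(clause)
--     return clauses
-- ===== SOURCE B (Python) =====
-- def at_most_k(a: list, k: int):
--     n = k + 1
--
--     def go(rest, partial):
--         if len(partial) == n:
--             return [partial]
--         if not rest:
--             return []
--         x, rest2 = rest[0], rest[1:]
--         return go(rest2, partial + [-x]) + go(rest2, partial)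
--
--     return go(a, [])
-- ===== Notes on version B (the rewrite author's own statement) =====
-- stated objective: alternative
-- what changed: Replaces the itertools.combinations pipeline (generate (k+1)-tuples, then negate each in a second loop) with one direct include/skip recursion over the list that builds each negated clause as it descends.
import Mathlib
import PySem

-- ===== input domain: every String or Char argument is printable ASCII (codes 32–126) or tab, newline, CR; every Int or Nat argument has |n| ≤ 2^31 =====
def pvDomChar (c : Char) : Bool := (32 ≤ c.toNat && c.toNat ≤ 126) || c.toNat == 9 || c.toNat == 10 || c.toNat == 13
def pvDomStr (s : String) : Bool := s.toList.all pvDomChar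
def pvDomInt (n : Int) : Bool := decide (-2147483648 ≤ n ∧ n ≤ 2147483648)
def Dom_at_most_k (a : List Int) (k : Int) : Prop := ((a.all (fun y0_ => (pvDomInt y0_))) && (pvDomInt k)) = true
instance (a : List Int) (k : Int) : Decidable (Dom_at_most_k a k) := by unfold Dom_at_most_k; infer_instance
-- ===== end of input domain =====

-- B replaces the itertools.combinations pipeline by a direct include/skip recursion that
-- builds each negated clause as it goes (alternative decomposition, same cost).
-- Equivalence on the return value; for k ≤ -2 Python A raises ValueError, excluded by Pre_.

-- ===== PORT A =====
-- itertools.combinations(a, r) in the lexicographic-by-position order it produces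
def pyCombinations (r : Nat) : List Int → List (List Int) :=
  fun xs =>
    match r, xs with
    | 0, _ => [[]]
    | _ + 1, [] => []
    | r + 1, x :: xs => (pyCombinations r xs).map (fun t => x :: t) ++ pyCombinations (r + 1) xs

def at_most_k (a : List Int) (k : Int) : List (List Int) :=
  let tuples := pyCombinations (k + 1).toNat a
  tuples.foldl (fun clauses tuple =>
    clauses ++ [tuple.foldl (fun clause element => clause ++ [-element]) []]) []

-- ===== PORT B =====
def altGo (n : Int) : List Int → List Int → List (List Int)
  | rest, part =>
    if (part.length : Int) = n then [part]
    else
      match rest with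
      | [] => []
      | x :: rest2 => altGo n rest2 (part ++ [-x]) ++ altGo n rest2 part

def at_most_k_alt (a : List Int) (k : Int) : List (List Int) :=
  altGo (k + 1) a []

-- ===== PRECONDITION & SPEC =====
-- Pre_ excludes k ≤ -2, where Python A raises ValueError (combinations with negative r).
def Pre_at_most_k (a : List Int) (k : Int) : Prop := -1 ≤ k
instance (a : List Int) (k : Int) : Decidable (Pre_at_most_k a k) := by unfold Pre_at_most_k; infer_instance
def pvWitness_at_most_k : List Int × Int := ([1, 2, 3], 1)

def Spec_at_most_k (a : List Int) (k : Int) (out : List (List Int)) : Prop := out = at_most_k_alt a k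
instance (a : List Int) (k : Int) (out : List (List Int)) : Decidable (Spec_at_most_k a k out) := by unfold Spec_at_most_k; infer_instance

-- ===== CLAIM (what is proved, stated in full; the proofs are below) =====
def Claim_equal_at_most_k : Prop := ∀ (a : List Int) (k : Int), Dom_at_most_k a k → Pre_at_most_k a k → Spec_at_most_k a k (at_most_k a k)

-- ===== LEMMAS AND PROOFS =====

-- A's inner loop negates a tuple element by element
theorem foldl_neg (t acc : List Int) :
    t.foldl (fun clause element => clause ++ [-element]) acc = acc ++ t.map (fun e => -e) := by
  induction t generalizing acc with
  | nil => simp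
  | cons x xs ih => rw [List.foldl_cons, ih]; simp

-- A's outer loop is a map
theorem foldl_clauses (ts : List (List Int)) (acc : List (List Int)) :
    ts.foldl (fun clauses tuple =>
      clauses ++ [tuple.foldl (fun clause element => clause ++ [-element]) []]) acc
    = acc ++ ts.map (fun t => t.map (fun e => -e)) := by
  induction ts generalizing acc with
  | nil => simp
  | cons t ts ih => rw [List.foldl_cons, ih, foldl_neg]; simp

-- B's recursion enumerates exactly the negated combinations, in the same order
theorem altGo_eq (n : Int) (rest part : List Int) (h : (part.length : Int) ≤ n) :
    altGo n rest part
      = (pyCombinations (n - part.length).toNat rest).map (fun t => part ++ t.map (fun e => -e)) := by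
  induction rest generalizing part with
  | nil =>
    by_cases hp : (part.length : Int) = n
    · have : (n - part.length).toNat = 0 := by omega
      simp [altGo, hp, this, pyCombinations]
    · have hlt : (part.length : Int) < n := lt_of_le_of_ne h hp
      obtain ⟨m, hm⟩ : ∃ m : Nat, (n - part.length).toNat = m + 1 := ⟨(n - part.length).toNat - 1, by omega⟩
      simp [altGo, hp, hm, pyCombinations]
  | cons x xs ih =>
    by_cases hp : (part.length : Int) = n
    · have : (n - part.length).toNat = 0 := by omega
      simp [altGo, hp, this, pyCombinations]
    · have hlt : (part.length : Int) < n := lt_of_le_of_ne h hp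
      obtain ⟨m, hm⟩ : ∃ m : Nat, (n - part.length).toNat = m + 1 := ⟨(n - part.length).toNat - 1, by omega⟩
      have h1 : ((part ++ [-x]).length : Int) ≤ n := by simp; omega
      have hm1 : (n - (part ++ [-x]).length).toNat = m := by simp; omega
      rw [altGo]
      simp only [hp, if_false]
      rw [ih (part ++ [-x]) h1, ih part h]
      rw [hm, hm1]
      simp [pyCombinations, List.map_map, Function.comp]

-- ===== VERDICT (by name: the statement is the Claim_ definition above) =====
theorem at_most_k_spec : Claim_equal_at_most_k := by
  intro a k _ hpre
  unfold Spec_at_most_k at_most_k at_most_k_alt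
  have h0 : ((([] : List Int)).length : Int) ≤ k + 1 := by
    unfold Pre_at_most_k at hpre; simp; omega
  rw [altGo_eq (k + 1) a [] h0, foldl_clauses]
  simp
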